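-- pv_equiv track=rewrite | github.com/M-krizz/BlueprintGPT | learned/planner/profile_dataset.py | _program_signature
-- ===== SOURCE A (Python) =====
-- from collections import Counter
-- from typing import Dict, List
--
-- def _program_signature(record: Dict) -> str:
--     room_counts: Counter = Counter()
--     for room in record.get("rooms", []):
--         room_type = str(room.get("type") or "").strip()
--         if room_type:
--             room_counts[room_type] += 1
--     if not room_counts:
--         return "empty"
--     return "|".join(f"{room_type}:{room_counts[room_type]}" for room_type in sorted(room_counts))
-- ===== SOURCE B (Python) =====
-- from itertools import groupby
--
--
-- def _program_signature(record):
--     types = [t for room in record.get("rooms", [])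
--              if (t := str(room.get("type") or "").strip())]
--     if not types:
--         return "empty"
--     types.sort()
--     return "|".join(f"{t}:{sum(1 for _ in g)}" for t, g in groupby(types))
-- ===== Notes on version B (the rewrite author's own statement) =====
-- stated objective: alternative
-- what changed: Replaces the Counter-then-sorted-keys strategy with collecting the cleaned type strings, sorting them, and run-length encoding consecutive runs (itertools.groupby) to produce type:count pairs.
import Mathlib
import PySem

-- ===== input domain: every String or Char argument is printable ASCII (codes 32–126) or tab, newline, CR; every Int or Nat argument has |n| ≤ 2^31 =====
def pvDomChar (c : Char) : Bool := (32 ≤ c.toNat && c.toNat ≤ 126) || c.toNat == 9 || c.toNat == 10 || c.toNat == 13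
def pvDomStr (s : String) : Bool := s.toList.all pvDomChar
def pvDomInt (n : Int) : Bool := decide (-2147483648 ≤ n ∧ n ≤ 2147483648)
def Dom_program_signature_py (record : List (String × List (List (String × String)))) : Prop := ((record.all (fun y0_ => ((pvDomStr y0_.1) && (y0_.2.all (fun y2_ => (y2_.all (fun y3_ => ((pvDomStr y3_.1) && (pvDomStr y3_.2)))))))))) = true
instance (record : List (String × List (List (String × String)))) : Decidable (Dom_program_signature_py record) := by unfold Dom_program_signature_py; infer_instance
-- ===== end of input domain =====

-- B sorts the cleaned room-type strings and run-length-encodes consecutive runs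
-- (groupby) instead of building a Counter and sorting its keys; same cost, alternative algorithm.

-- ===== PORT A =====
def program_signature_py (record : List (String × List (List (String × String)))) : String :=
  let rooms := (PySem.Dict.mk record).getD "rooms" []
  let room_counts : PySem.Dict String Int :=
    rooms.foldl (fun d room =>
      let room_type := PySem.Str.strip (((PySem.Dict.mk room).get? "type").getD "")
      if room_type ≠ "" then d.modify room_type 0 (· + 1) else d) PySem.Dict.empty
  if room_counts.items = [] then "empty"
  else PySem.Str.join "|"
    ((PySem.List.sorted room_counts.keys (fun x => x) false).map
      (fun room_type => room_type ++ ":" ++ PySem.Int.toStr (room_counts.getD room_type 0)))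

-- ===== PORT B =====
-- run-length encoding of consecutive equal elements (itertools.groupby with run lengths)
def pvRle (l : List String) : List (String × Int) :=
  match l with
  | [] => []
  | x :: xs => (x, 1 + (xs.takeWhile (· == x)).length) :: pvRle (xs.dropWhile (· == x))
termination_by l.length
decreasing_by simpa using Nat.lt_succ_of_le (List.length_dropWhile_le _ _)

def program_signature_py_alt (record : List (String × List (List (String × String)))) : String :=
  let types := ((PySem.Dict.mk record).getD "rooms" []).filterMap (fun room =>
    let t := PySem.Str.strip (((PySem.Dict.mk room).get? "type").getD "")
    if t = "" then none else some t)
  if types = [] then "empty"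
  else PySem.Str.join "|"
    ((pvRle (PySem.List.sorted types (fun x => x) false)).map
      (fun p => p.1 ++ ":" ++ PySem.Int.toStr p.2))

-- ===== PRECONDITION & SPEC =====
def Spec_program_signature_py (record : List (String × List (List (String × String)))) (out : String) : Prop := out = program_signature_py_alt record
instance (record : List (String × List (List (String × String)))) (out : String) : Decidable (Spec_program_signature_py record out) := by unfold Spec_program_signature_py; infer_instance

-- ===== CLAIM (what is proved, stated in full; the proofs are below) =====
def Claim_equal_program_signature_py : Prop := ∀ (record : List (String × List (List (String × String)))), Dom_program_signature_py record → Spec_program_signature_py record (program_signature_py record)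

-- ===== LEMMAS AND PROOFS =====

-- A's guarded counting loop is Counter(types) for the filtered list of cleaned types
theorem pv_foldl_counter (g : List (String × String) → String)
    (rooms : List (List (String × String))) (d : PySem.Dict String Int) :
    rooms.foldl (fun d room => if g room = "" then d else d.modify (g room) 0 (· + 1)) d
      = (rooms.filterMap (fun room => if g room = "" then none else some (g room))).foldl
          (fun d t => d.modify t 0 (· + 1)) d := by
  induction rooms generalizing d with
  | nil => rfl
  | cons r rs ih =>
    simp only [List.foldl_cons, List.filterMap_cons]
    by_cases h : g r = "" <;> simp only [h] <;> exact ih _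

theorem pvRle_spec (l : List String) (h : l.Pairwise (· ≤ ·)) :
    (((pvRle l).map Prod.fst).Pairwise (· < ·)) ∧
    (∀ x, x ∈ (pvRle l).map Prod.fst ↔ x ∈ l) ∧
    (∀ p ∈ pvRle l, p.2 = (l.count p.1 : Int)) := by
  induction l using pvRle.induct with
  | case1 => simp [pvRle]
  | case2 x xs ih =>
    rw [List.pairwise_cons] at h
    obtain ⟨hxle, hpw⟩ := h
    have hsub : List.Sublist (xs.dropWhile (· == x)) xs := List.dropWhile_sublist _
    have ihs := ih (hpw.sublist hsub)
    obtain ⟨ih1, ih2, ih3⟩ := ihs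
    -- every element of the dropWhile suffix is strictly greater than x
    have hlt : ∀ y ∈ xs.dropWhile (· == x), x < y := by
      cases hd : xs.dropWhile (· == x) with
      | nil => simp
      | cons z t =>
        have hz : ¬ (z == x) = true := by
          have := List.head?_dropWhile_not (· == x) xs
          rw [hd] at this; simpa using this
        have hzx : z ≠ x := by simpa using hz
        have hzmem : z ∈ xs := hsub.mem (by simp [hd])
        have hxz : x < z := lt_of_le_of_ne (hxle z hzmem) (Ne.symm hzx)
        intro y hy
        rcases (by simpa [hd] using hy : y = z ∨ y ∈ t) with rfl | hyt
        · exact hxz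
        · have hzt : z ≤ y := by
            have : (z :: t).Pairwise (· ≤ ·) := hd ▸ hpw.sublist hsub
            exact (List.pairwise_cons.mp this).1 y hyt
          exact lt_of_lt_of_le hxz hzt
    have hxnot : x ∉ xs.dropWhile (· == x) := fun hm => lt_irrefl x (hlt x hm)
    have htake : ∀ y ∈ xs.takeWhile (· == x), y = x := by
      intro y hy
      simpa using List.mem_takeWhile_imp hy
    have hcx : (x :: xs).count x = 1 + (xs.takeWhile (· == x)).length := by
      have hxs : xs = xs.takeWhile (· == x) ++ xs.dropWhile (· == x) :=
        (List.takeWhile_append_dropWhile).symm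
      rw [List.count_cons_self]
      have hsplit : xs.count x = (xs.takeWhile (· == x)).count x + (xs.dropWhile (· == x)).count x := by
        conv_lhs => rw [hxs]
        rw [List.count_append]
      rw [hsplit]
      have h1 : (xs.takeWhile (· == x)).count x = (xs.takeWhile (· == x)).length := by
        apply List.count_eq_length.mpr
        intro y hy; simpa using (htake y hy).symm
      have h2 : (xs.dropWhile (· == x)).count x = 0 :=
        List.count_eq_zero.mpr hxnot
      omega
    refine ⟨?_, ?_, ?_⟩
    · rw [pvRle]
      simp only [List.map_cons, List.pairwise_cons]
      refine ⟨?_, ih1⟩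
      intro b hb
      rcases List.mem_map.mp hb with ⟨p, hp, rfl⟩
      exact hlt p.1 ((ih2 p.1).mp (List.mem_map_of_mem hp))
    · intro y
      rw [pvRle]
      simp only [List.map_cons, List.mem_cons, ih2]
      constructor
      · rintro (rfl | hy)
        · exact Or.inl rfl
        · exact Or.inr (hsub.mem hy)
      · rintro (rfl | hy)
        · exact Or.inl rfl
        · rcases (by
            conv at hy => rw [(List.takeWhile_append_dropWhile (p := (· == x)) (l := xs)).symm]
            exact List.mem_append.mp hy) with htk | hdr
          · exact Or.inl (htake y htk)
          · exact Or.inr hdr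
    · intro p hp
      rw [pvRle] at hp
      rcases List.mem_cons.mp hp with rfl | hp'
      · simp only [hcx]; push_cast; ring
      · have h2 := ih3 p hp'
        have hmem : p.1 ∈ xs.dropWhile (· == x) := (ih2 p.1).mp (List.mem_map_of_mem hp')
        have hne : p.1 ≠ x := fun he => hxnot (he ▸ hmem)
        have hxs : xs = xs.takeWhile (· == x) ++ xs.dropWhile (· == x) :=
          (List.takeWhile_append_dropWhile).symm
        have hct : (xs.takeWhile (· == x)).count p.1 = 0 := by
          apply List.count_eq_zero.mpr
          intro hm; exact hne (htake _ hm)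
        rw [h2]
        congr 1
        have hc0 : (x :: xs).count p.1 = xs.count p.1 := by
          simp [Ne.symm hne]
        have hxcnt : xs.count p.1 = (xs.dropWhile (· == x)).count p.1 := by
          conv_lhs => rw [hxs]
          rw [List.count_append, hct]
          omega
        rw [hc0, hxcnt]

-- the sorted distinct keys are exactly the first components of the run-length encoding
theorem pv_sorted_keys (ts : List String) :
    PySem.List.sorted (PySem.Set.ofList ts) (fun x => x) false
      = (pvRle (PySem.List.sorted ts (fun x => x) false)).map Prod.fst := by
  have hpw : (PySem.List.sorted ts (fun x => x) false).Pairwise (· ≤ ·) :=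
    PySem.List.sorted_pairwise ts (fun x => x)
  obtain ⟨h1, h2, _⟩ := pvRle_spec _ hpw
  apply PySem.List.sorted_eq_of_perm_of_pairwise_lt
  · rw [List.perm_ext_iff_of_nodup (h1.nodup) (PySem.Set.nodup_ofList ts)]
    intro a
    rw [h2 a, PySem.List.mem_sorted, PySem.Set.mem_ofList]
  · exact h1

theorem pv_rle_counts (ts : List String) :
    pvRle (PySem.List.sorted ts (fun x => x) false)
      = ((pvRle (PySem.List.sorted ts (fun x => x) false)).map Prod.fst).map
          (fun k => (k, (ts.count k : Int))) := by
  have hpw : (PySem.List.sorted ts (fun x => x) false).Pairwise (· ≤ ·) :=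
    PySem.List.sorted_pairwise ts (fun x => x)
  obtain ⟨_, _, h3⟩ := pvRle_spec _ hpw
  rw [List.map_map]
  symm
  apply List.map_congr_left ?_ |>.trans (List.map_id _)
  intro p hp
  have := h3 p hp
  have hcnt : (PySem.List.sorted ts (fun x => x) false).count p.1 = ts.count p.1 :=
    (PySem.List.sorted_perm ts (fun x => x) false).count_eq p.1
  ext
  · rfl
  · simp only [Function.comp_apply, id]
    rw [this, hcnt]

-- the whole equivalence, for an arbitrary room-cleaning function g
theorem pv_main (g : List (String × String) → String) (rooms : List (List (String × String))) :
    (let room_counts : PySem.Dict String Int :=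
      rooms.foldl (fun d room => if g room ≠ "" then d.modify (g room) 0 (· + 1) else d) PySem.Dict.empty
     if room_counts.items = [] then "empty"
     else PySem.Str.join "|"
       ((PySem.List.sorted room_counts.keys (fun x => x) false).map
         (fun room_type => room_type ++ ":" ++ PySem.Int.toStr (room_counts.getD room_type 0))))
    = (let types := rooms.filterMap (fun room => if g room = "" then none else some (g room))
       if types = [] then "empty"
       else PySem.Str.join "|"
         ((pvRle (PySem.List.sorted types (fun x => x) false)).map
           (fun p => p.1 ++ ":" ++ PySem.Int.toStr p.2))) := by
  simp only []
  set ts := rooms.filterMap (fun room => if g room = "" then none else some (g room)) with hts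
  have hcounter :
      rooms.foldl (fun d room => if g room ≠ "" then d.modify (g room) 0 (· + 1) else d) PySem.Dict.empty
        = PySem.Dict.counter ts := by
    simp only [ne_eq, ite_not]
    rw [PySem.Dict.counter_eq_foldl, hts]
    exact pv_foldl_counter g rooms PySem.Dict.empty
  rw [hcounter]
  have hkeys : (PySem.Dict.counter ts).keys = PySem.Set.ofList ts :=
    PySem.Dict.keys_counter ts
  have hempty : ((PySem.Dict.counter ts).items = []) ↔ (ts = []) := by
    constructor
    · intro h
      by_contra hne
      rcases List.exists_mem_of_ne_nil ts hne with ⟨a, ha⟩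
      have : a ∈ (PySem.Dict.counter ts).keys := by
        rw [hkeys, PySem.Set.mem_ofList]; exact ha
      rw [PySem.Dict.keys, h] at this
      simp at this
    · intro h; rw [h]; rfl
  by_cases hnil : ts = []
  · rw [if_pos (hempty.mpr hnil), if_pos hnil]
  · rw [if_neg (fun h => hnil (hempty.mp h)), if_neg hnil]
    congr 1
    rw [hkeys, pv_sorted_keys ts]
    conv_rhs => rw [pv_rle_counts ts]
    rw [List.map_map, List.map_map, List.map_map]
    apply List.map_congr_left
    intro k _
    simp only [Function.comp_apply]
    rw [PySem.Dict.getD_counter]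

-- ===== VERDICT (by name: the statement is the Claim_ definition above) =====
theorem program_signature_py_spec : Claim_equal_program_signature_py := by
  intro record _
  unfold Spec_program_signature_py program_signature_py program_signature_py_alt
  exact pv_main (fun room => PySem.Str.strip (((PySem.Dict.mk room).get? "type").getD "")) _
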